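-- pv_equiv track=rewrite | github.com/felipefoschiera/Competitive-Programming | URI Online Judge/AD-HOC/1514 - Competição/comp.py | ngmResolveuTodos
-- ===== SOURCE A (Python) =====
-- def ngmResolveuTodos(problemas, n, m):
--     cnt = 0
--     resolveuTodos = False
--     resolveuNenhum = False
--     for i in range(n):
--         if sum(problemas[i]) == m:
--             resolveuTodos = True
--         if sum(problemas[i]) == 0:
--             resolveuNenhum = True
--     if not resolveuTodos: cnt += 1
--     if not resolveuNenhum: cnt += 1
--     return cnt
-- ===== SOURCE B (Python) =====
-- def ngmResolveuTodos(problemas, n, m):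
--     def go(i, needTodos, needNenhum):
--         if i >= n or not (needTodos or needNenhum):
--             return needTodos + needNenhum
--         s = sum(problemas[i])
--         return go(i + 1, needTodos and s != m, needNenhum and s != 0)
--     return go(0, True, True)
-- ===== Notes on version B (the rewrite author's own statement) =====
-- stated objective: alternative
-- what changed: Replaces A's full flag-setting loop by a tail-recursive scan over 'still needed' counters that stops early as soon as both a full-score and a zero-score row have been seen, summing each row once instead of twice.
import Mathlib
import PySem

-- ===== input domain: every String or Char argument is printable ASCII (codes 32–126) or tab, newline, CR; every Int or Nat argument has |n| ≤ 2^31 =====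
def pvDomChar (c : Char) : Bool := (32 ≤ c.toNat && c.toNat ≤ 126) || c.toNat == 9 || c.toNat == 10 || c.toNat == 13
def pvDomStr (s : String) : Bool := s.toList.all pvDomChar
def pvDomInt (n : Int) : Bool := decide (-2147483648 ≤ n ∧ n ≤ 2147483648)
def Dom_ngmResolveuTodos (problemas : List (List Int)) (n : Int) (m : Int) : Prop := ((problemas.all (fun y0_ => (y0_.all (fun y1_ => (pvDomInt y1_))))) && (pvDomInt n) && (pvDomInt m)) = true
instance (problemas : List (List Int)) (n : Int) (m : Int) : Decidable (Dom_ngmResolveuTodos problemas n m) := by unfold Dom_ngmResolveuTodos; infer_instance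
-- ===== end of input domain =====

-- B replaces A's full flag-setting loop by a tail-recursive scan over "still needed" flags
-- that stops early once both a full-score and a zero-score row were seen (objective: alternative).

-- ===== PORT A =====
def ngmResolveuTodos (problemas : List (List Int)) (n : Int) (m : Int) : Int :=
  let st := (PySem.List.pyRange 0 n 1).foldl
    (fun (st : Bool × Bool) i =>
      let st1 := if ((PySem.List.pyGet? problemas i).getD []).sum = m then true else st.1
      let st2 := if ((PySem.List.pyGet? problemas i).getD []).sum = 0 then true else st.2
      (st1, st2))
    (false, false)
  (if st.1 then 0 else 1) + (if st.2 then 0 else 1)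

-- ===== PORT B =====
def ngmGo (problemas : List (List Int)) (n m : Int) (i : Int) (needT needN : Bool) : Int :=
  if i ≥ n ∨ ¬(needT || needN) = true then
    (if needT then 1 else 0) + (if needN then 1 else 0)
  else
    let s := ((PySem.List.pyGet? problemas i).getD []).sum
    ngmGo problemas n m (i + 1) (needT && decide (s ≠ m)) (needN && decide (s ≠ 0))
termination_by (n - i).toNat
decreasing_by omega

def ngmResolveuTodos_alt (problemas : List (List Int)) (n : Int) (m : Int) : Int :=
  ngmGo problemas n m 0 true true

-- ===== PRECONDITION & SPEC =====
-- Pre_ excludes exactly the inputs where Python A raises IndexError (n exceeds len(problemas)).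
def Pre_ngmResolveuTodos (problemas : List (List Int)) (n : Int) (m : Int) : Prop :=
  n ≤ (problemas.length : Int)
instance (problemas : List (List Int)) (n : Int) (m : Int) : Decidable (Pre_ngmResolveuTodos problemas n m) := by unfold Pre_ngmResolveuTodos; infer_instance
def pvWitness_ngmResolveuTodos : List (List Int) × Int × Int := ([[1, 2], [0]], 2, 3)

def Spec_ngmResolveuTodos (problemas : List (List Int)) (n : Int) (m : Int) (out : Int) : Prop := out = ngmResolveuTodos_alt problemas n m
instance (problemas : List (List Int)) (n : Int) (m : Int) (out : Int) : Decidable (Spec_ngmResolveuTodos problemas n m out) := by unfold Spec_ngmResolveuTodos; infer_instance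

-- ===== CLAIM =====
def Claim_equal_ngmResolveuTodos : Prop := ∀ (problemas : List (List Int)) (n : Int) (m : Int), Dom_ngmResolveuTodos problemas n m → Pre_ngmResolveuTodos problemas n m → Spec_ngmResolveuTodos problemas n m (ngmResolveuTodos problemas n m)

-- ===== LEMMAS AND PROOFS =====
theorem fold_flags (l : List Int) (f : Int → Int) (m : Int) (a b : Bool) :
    (l.foldl
      (fun (st : Bool × Bool) i =>
        let st1 := if f i = m then true else st.1
        let st2 := if f i = 0 then true else st.2
        (st1, st2))
      (a, b))
    = (a || l.any (fun i => f i == m), b || l.any (fun i => f i == 0)) := by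
  induction l generalizing a b with
  | nil => simp
  | cons x xs ih =>
      simp only [List.foldl_cons, List.any_cons, ih]
      by_cases h1 : f x = m <;> by_cases h2 : f x = 0
      · have hm : m = 0 := by rw [← h1, h2]
        simp [h1, hm]
      · have hm : decide (m = (0 : Int)) = false := decide_eq_false (fun hc => h2 (by rw [h1, hc]))
        have hb : (m == (0 : Int)) = false := beq_eq_false_iff_ne.mpr (fun hc => h2 (by rw [h1, hc]))
        simp [h1, hm, hb]
      · have hm : decide ((0 : Int) = m) = false := decide_eq_false (fun hc => h1 (by rw [h2, hc]))
        have hb : ((0 : Int) == m) = false := beq_eq_false_iff_ne.mpr (fun hc => h1 (by rw [h2, hc]))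
        simp [h2, hm, hb]
      · have e1 : (f x == m) = false := beq_eq_false_iff_ne.mpr h1
        have e2 : (f x == (0 : Int)) = false := beq_eq_false_iff_ne.mpr h2
        simp [h1, h2, e1, e2]

theorem ngmGo_eq (problemas : List (List Int)) (n m : Int) :
    ∀ (i : Int) (needT needN : Bool),
      ngmGo problemas n m i needT needN =
        (if needT && !((PySem.List.pyRange i n 1).any
            (fun j => ((PySem.List.pyGet? problemas j).getD []).sum == m)) then 1 else 0)
      + (if needN && !((PySem.List.pyRange i n 1).any
            (fun j => ((PySem.List.pyGet? problemas j).getD []).sum == 0)) then 1 else 0) := by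
  intro i
  induction hfuel : (n - i).toNat using Nat.strong_induction_on generalizing i with
  | _ fuel ih =>
    intro needT needN
    rw [ngmGo]
    by_cases hin : i ≥ n
    · rw [PySem.List.pyRange_one_eq_nil hin]
      simp [hin]
    · have hin2 : i < n := by omega
      rw [PySem.List.pyRange_one_cons hin2]
      by_cases hneed : (needT || needN) = true
      · have hlt : (n - (i + 1)).toNat < fuel := by omega
        rw [if_neg (by
          rintro (hc | hc)
          · omega
          · exact hc hneed)]
        rw [ih _ hlt (i + 1) rfl]
        simp only [List.any_cons, Bool.not_or]
        by_cases h1 : ((PySem.List.pyGet? problemas i).getD []).sum = m <;>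
          by_cases h2 : ((PySem.List.pyGet? problemas i).getD []).sum = 0 <;>
          cases needT <;> cases needN <;>
          simp [h1, h2]
      · rw [if_pos (Or.inr (by simp_all))]
        simp at hneed
        simp [hneed.1, hneed.2]

theorem ngmResolveuTodos_spec : Claim_equal_ngmResolveuTodos := by
  intro problemas n m _ _
  unfold Spec_ngmResolveuTodos ngmResolveuTodos ngmResolveuTodos_alt
  simp only [fold_flags]
  rw [ngmGo_eq]
  cases h1 : ((PySem.List.pyRange 0 n 1).any
      (fun j => ((PySem.List.pyGet? problemas j).getD []).sum == m)) <;>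
  cases h2 : ((PySem.List.pyRange 0 n 1).any
      (fun j => ((PySem.List.pyGet? problemas j).getD []).sum == 0)) <;>
    simp
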